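-- pv_equiv track=rewrite | github.com/k-harada/AtCoder | other_contests/HHKB2020/B.py | solve
-- ===== SOURCE A (Python) =====
-- def solve(h, w, s_list):
--     res = 0
--     for i in range(h):
--         for j in range(w - 1):
--             if s_list[i][j] == s_list[i][j + 1] == ".":
--                 res += 1
--     for i in range(h - 1):
--         for j in range(w):
--             if s_list[i][j] == s_list[i + 1][j] == ".":
--                 res += 1
--     return res
-- ===== SOURCE B (Python) =====
-- def _runs(seq):
--     """Maximal runs of equal elements: list of (value, length)."""
--     runs = []
--     cur = None
--     n = 0
--     for x in seq:
--         if n > 0 and x == cur: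
--             n += 1
--         else:
--             if n > 0:
--                 runs.append((cur, n))
--             cur, n = x, 1
--     if n > 0:
--         runs.append((cur, n))
--     return runs
--
--
-- def solve(h, w, s_list):
--     # A grid with no rows or no columns has no adjacent pairs.
--     if h <= 0 or w <= 0:
--         return 0
--     # Crop the grid to its declared h x w size, then count adjacency by
--     # run-length decomposition: a run of L dots contributes L-1 pairs.
--     rows = [s[:w] for s in s_list[:h]]
--     total = 0
--     for line in rows:                       # horizontal pairs
--         total += sum(n - 1 for c, n in _runs(line) if c == ".")
--     for col in zip(*rows):                  # vertical pairs
--         total += sum(n - 1 for c, n in _runs(col) if c == ".")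
--     return total
-- ===== Notes on version B (the rewrite author's own statement) =====
-- stated objective: alternative
-- what changed: Replaces the two pairwise neighbor-testing double loops with a run-length decomposition: the grid is cropped to h x w (empty for non-positive dimensions), each row and each column of the transposed grid is split into maximal runs of equal characters, and every run of L dots contributes L-1 adjacent pairs.
import Mathlib
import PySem

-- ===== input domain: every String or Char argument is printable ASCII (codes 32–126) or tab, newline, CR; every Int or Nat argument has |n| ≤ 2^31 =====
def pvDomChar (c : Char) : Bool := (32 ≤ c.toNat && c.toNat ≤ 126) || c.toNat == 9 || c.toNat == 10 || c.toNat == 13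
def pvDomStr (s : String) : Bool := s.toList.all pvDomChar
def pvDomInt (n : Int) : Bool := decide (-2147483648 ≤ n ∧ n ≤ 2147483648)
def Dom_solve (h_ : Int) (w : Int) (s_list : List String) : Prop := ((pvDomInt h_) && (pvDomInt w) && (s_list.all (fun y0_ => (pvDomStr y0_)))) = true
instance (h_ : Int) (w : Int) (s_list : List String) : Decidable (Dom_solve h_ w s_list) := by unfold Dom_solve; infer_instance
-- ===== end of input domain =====

-- B replaces A's two pairwise neighbor-testing double loops by a run-length
-- decomposition of the cropped grid's rows and columns (a run of L dots gives L-1 pairs);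
-- objective: alternative (same cost, different algorithm).

-- ===== PORT A =====
-- s_list[i][j] (chained access; none = IndexError, excluded by Pre_solve)
def pyCell (s_list : List String) (i j : Int) : Option Char :=
  (PySem.List.pyGet? s_list i).bind (fun s => PySem.List.pyGet? s.toList j)

def solve (h_ : Int) (w : Int) (s_list : List String) : Int :=
  let res1 : Int := (PySem.List.pyRange 0 h_ 1).foldl (fun res i =>
    (PySem.List.pyRange 0 (w - 1) 1).foldl (fun res j =>
      if pyCell s_list i j = some '.' ∧ pyCell s_list i (j + 1) = some '.' then res + 1 else res) res) 0
  (PySem.List.pyRange 0 (h_ - 1) 1).foldl (fun res i =>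
    (PySem.List.pyRange 0 w 1).foldl (fun res j =>
      if pyCell s_list i j = some '.' ∧ pyCell s_list (i + 1) j = some '.' then res + 1 else res) res) res1

-- ===== PORT B =====
-- _runs: maximal runs of equal elements as (value, length) pairs
def runsAux : Char → Nat → List Char → List (Char × Nat)
  | c, n, [] => [(c, n)]
  | c, n, x :: xs => if x = c then runsAux c (n + 1) xs else (c, n) :: runsAux x 1 xs

def runs : List Char → List (Char × Nat)
  | [] => []
  | x :: xs => runsAux x 1 xs

-- sum(n - 1 for c, n in _runs(line) if c == ".")
def runScore (l : List Char) : Int :=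
  (((runs l).filter (fun p => p.1 == '.')).map (fun p => (p.2 : Int) - 1)).sum

-- hand port of python's zip(*rows): truncates to the shortest row (exact)
def pyZipStar {α : Type} : List (List α) → List (List α)
  | [] => []
  | [r] => r.map (fun c => [c])
  | r :: r' :: t => List.zipWith List.cons r (pyZipStar (r' :: t))

def solve_alt (h_ : Int) (w : Int) (s_list : List String) : Int :=
  if h_ ≤ 0 ∨ w ≤ 0 then 0 else
  let rows : List (List Char) :=
    (PySem.List.slice s_list none (some h_)).map (fun s => PySem.List.slice s.toList none (some w))
  let total : Int := rows.foldl (fun t line => t + runScore line) 0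
  (pyZipStar rows).foldl (fun t col => t + runScore col) total

-- ===== PRECONDITION & SPEC =====
-- Pre_solve is exactly the set of inputs on which A returns (no IndexError): either a
-- vacuous shape (h ≤ 0, w ≤ 0, or h = w = 1) where A's loops never index a cell, or a
-- proper grid shape (h ≤ len(s_list) and each of the first h rows has at least w chars).
def Pre_solve (h_ : Int) (w : Int) (s_list : List String) : Prop :=
  h_ ≤ 0 ∨ w ≤ 0 ∨ (h_ = 1 ∧ w = 1) ∨
    (h_ ≤ (s_list.length : Int) ∧ ∀ s ∈ s_list.take h_.toNat, w ≤ (s.toList.length : Int))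
instance (h_ : Int) (w : Int) (s_list : List String) : Decidable (Pre_solve h_ w s_list) := by
  unfold Pre_solve; infer_instance

def pvWitness_solve : Int × Int × List String := (3, 2, ["..", ".#", ".."])

def Spec_solve (h_ : Int) (w : Int) (s_list : List String) (out : Int) : Prop := out = solve_alt h_ w s_list
instance (h_ : Int) (w : Int) (s_list : List String) (out : Int) : Decidable (Spec_solve h_ w s_list out) := by unfold Spec_solve; infer_instance

-- ===== CLAIM (what is proved, stated in full; the proofs are below) =====
def Claim_equal_solve : Prop := ∀ (h_ : Int) (w : Int) (s_list : List String), Dom_solve h_ w s_list → Pre_solve h_ w s_list → Spec_solve h_ w s_list (solve h_ w s_list)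

-- ===== LEMMAS AND PROOFS =====

-- indicator of an adjacent dot pair
def ind (x y : Char) : Int := if x = '.' ∧ y = '.' then 1 else 0

-- fold of f over adjacent pairs of a list
def AP {α : Type} (f : α → α → Int) : List α → Int
  | x :: y :: t => f x y + AP f (y :: t)
  | _ => 0

-- dot pairs between two stacked rows
def rowPC (r1 r2 : List Char) : Int := ((r1.zip r2).map (fun p => ind p.1 p.2)).sum

theorem AP_short {α : Type} (f : α → α → Int) (l : List α) (h : l.length ≤ 1) : AP f l = 0 := by
  match l, h with
  | [], _ => rfl
  | [x], _ => rfl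

theorem runsAux_sum (xs : List Char) : ∀ (c : Char) (n : Nat),
    (((runsAux c n xs).filter (fun p => p.1 == '.')).map (fun p => (p.2 : Int) - 1)).sum
      = (if c = '.' then (n : Int) - 1 else 0) + AP ind (c :: xs) := by
  induction xs with
  | nil =>
    intro c n
    by_cases hc : c = '.' <;> simp [runsAux, AP, hc]
  | cons x xs ih =>
    intro c n
    by_cases hx : x = c
    · subst hx
      rw [show runsAux x n (x :: xs) = runsAux x (n + 1) xs from by simp [runsAux]]
      rw [ih]
      show _ = _ + AP ind (x :: x :: xs)
      rw [show AP ind (x :: x :: xs) = ind x x + AP ind (x :: xs) from rfl]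
      by_cases hc : x = '.'
      · simp [ind, hc]; ring
      · simp [ind, hc]
    · rw [show runsAux c n (x :: xs) = (c, n) :: runsAux x 1 xs from by simp [runsAux, hx]]
      have hcx : ind c x = 0 := by
        unfold ind
        have : ¬ (c = '.' ∧ x = '.') := by
          rintro ⟨h1, h2⟩; exact hx (h2.trans h1.symm)
        simp [this]
      show _ = _ + AP ind (c :: x :: xs)
      rw [show AP ind (c :: x :: xs) = ind c x + AP ind (x :: xs) from rfl, hcx]
      by_cases hc : c = '.'
      · simp [hc, ih x 1]
      · simp [hc, ih x 1]

theorem runScore_eq (l : List Char) : runScore l = AP ind l := by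
  cases l with
  | nil => rfl
  | cons x xs =>
    unfold runScore runs
    rw [runsAux_sum xs x 1]
    by_cases hc : x = '.' <;> simp [hc]

theorem adj_sum {α : Type} (F : Option α → Option α → Int) :
    ∀ (m : Nat) (l : List α), m + 1 ≤ l.length →
    ((List.range m).map (fun k => F l[k]? l[k+1]?)).sum
      = AP (fun x y => F (some x) (some y)) (l.take (m + 1)) := by
  intro m
  induction m with
  | zero =>
    intro l _
    rw [AP_short]
    · simp
    · simp
  | succ m ih =>
    intro l hm
    match l, hm with
    | x :: y :: t, hm =>
      rw [List.range_succ_eq_map]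
      have hlen : m + 1 ≤ (y :: t).length := by
        simpa using Nat.succ_le_succ_iff.mp (by simpa using hm)
      have := ih (y :: t) hlen
      simp only [List.map_cons, List.map_map, List.sum_cons]
      rw [show ((List.range m).map ((fun k => F (x :: y :: t)[k]? (x :: y :: t)[k+1]?) ∘ Nat.succ)).sum
            = ((List.range m).map (fun k => F (y :: t)[k]? (y :: t)[k+1]?)).sum from by
          congr 1]
      rw [this]
      show F (some x) (some y) + _ = AP _ (x :: y :: (t.take m))
      rw [show AP (fun x y => F (some x) (some y)) (x :: y :: t.take m)
            = F (some x) (some y) + AP (fun x y => F (some x) (some y)) (y :: t.take m) from rfl]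
      rfl

theorem zip_sum {α : Type} (F : Option α → Option α → Int) :
    ∀ (m : Nat) (r1 r2 : List α), m ≤ r1.length → m ≤ r2.length →
    ((List.range m).map (fun k => F r1[k]? r2[k]?)).sum
      = (((r1.take m).zip (r2.take m)).map (fun p => F (some p.1) (some p.2))).sum := by
  intro m
  induction m with
  | zero => intro r1 r2 _ _; simp
  | succ m ih =>
    intro r1 r2 h1 h2
    match r1, r2, h1, h2 with
    | a :: r1, b :: r2, h1, h2 =>
      rw [List.range_succ_eq_map]
      simp only [List.map_cons, List.map_map, List.sum_cons, List.take_succ_cons,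
        List.zip_cons_cons]
      rw [show ((List.range m).map ((fun k => F (a :: r1)[k]? (b :: r2)[k]?) ∘ Nat.succ)).sum
            = ((List.range m).map (fun k => F r1[k]? r2[k]?)).sum from by
          congr 1]
      rw [ih r1 r2 (by simpa using h1) (by simpa using h2)]
      rfl

theorem pyZipStar_length {α : Type} (W : Nat) :
    ∀ (g : List (List α)), g ≠ [] → (∀ r ∈ g, r.length = W) → (pyZipStar g).length = W := by
  intro g
  induction g with
  | nil => intro h; exact absurd rfl h
  | cons r t ih =>
    intro _ hrect
    cases t with
    | nil => simpa [pyZipStar] using hrect r (by simp)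
    | cons r' t' =>
      rw [show pyZipStar (r :: r' :: t') = List.zipWith List.cons r (pyZipStar (r' :: t')) from rfl]
      rw [List.length_zipWith, ih (by simp) (by intro x hx; exact hrect x (List.mem_cons_of_mem _ hx)),
        hrect r (by simp)]
      simp

theorem cons_zip_sum {α : Type} (f : α → α → Int) :
    ∀ (r1 r2 : List α) (X : List (List α)), r1.length = r2.length → r2.length ≤ X.length →
    ((List.zipWith List.cons r1 (List.zipWith List.cons r2 X)).map (AP f)).sum
      = ((r1.zip r2).map (fun p => f p.1 p.2)).sum
        + ((List.zipWith List.cons r2 X).map (AP f)).sum := by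
  intro r1
  induction r1 with
  | nil =>
    intro r2 X h1 _
    have : r2 = [] := List.eq_nil_of_length_eq_zero h1.symm
    subst this; simp
  | cons a r1 ih =>
    intro r2 X h1 h2
    match r2, X, h1, h2 with
    | b :: r2, x :: X, h1, h2 =>
      simp only [List.zipWith_cons_cons, List.map_cons, List.sum_cons, List.zip_cons_cons]
      rw [show AP f (a :: b :: x) = f a b + AP f (b :: x) from rfl]
      rw [ih r2 X (by simpa using h1) (by simpa using h2)]
      ring

theorem map_singleton_eq_zipWith {α : Type} : ∀ (r : List α),
    r.map (fun c => [c]) = List.zipWith List.cons r (r.map (fun _ => ([] : List α)))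
  | [] => rfl
  | c :: cs => by simpa using map_singleton_eq_zipWith cs

theorem trans_sum (W : Nat) :
    ∀ (g : List (List Char)), (∀ r ∈ g, r.length = W) →
    ((pyZipStar g).map (AP ind)).sum = AP rowPC g := by
  intro g
  induction g with
  | nil => intro _; rfl
  | cons r1 t ih =>
    intro hrect
    cases t with
    | nil =>
      rw [show pyZipStar [r1] = r1.map (fun c => [c]) from rfl]
      rw [AP_short rowPC [r1] (by simp), List.map_map]
      rw [show (List.map (AP ind ∘ fun c => [c]) r1) = r1.map (fun _ => (0 : Int)) from
        List.map_congr_left (fun c _ => rfl)]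
      simp
    | cons r2 t' =>
      have hrect' : ∀ r ∈ r2 :: t', r.length = W := fun r hr =>
        hrect r (List.mem_cons_of_mem _ hr)
      -- pyZipStar (r2 :: t') = zipWith cons r2 X with W ≤ X.length
      obtain ⟨X, hXlen, hXeq⟩ : ∃ X : List (List Char), W ≤ X.length ∧
          pyZipStar (r2 :: t') = List.zipWith List.cons r2 X := by
        cases t' with
        | nil =>
          refine ⟨r2.map (fun _ => []), by simp [hrect' r2 (by simp)], ?_⟩
          rw [show pyZipStar [r2] = r2.map (fun c => [c]) from rfl]
          exact map_singleton_eq_zipWith r2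
        | cons r3 t'' =>
          exact ⟨pyZipStar (r3 :: t''), by
            rw [pyZipStar_length W (r3 :: t'') (by simp)
              (fun r hr => hrect' r (List.mem_cons_of_mem _ hr))], rfl⟩
      rw [show pyZipStar (r1 :: r2 :: t') = List.zipWith List.cons r1 (pyZipStar (r2 :: t')) from rfl,
        hXeq]
      rw [cons_zip_sum ind r1 r2 X
        (by rw [hrect r1 (by simp), hrect' r2 (by simp)])
        (by rw [hrect' r2 (by simp)]; exact hXlen)]
      rw [← hXeq, ih hrect']
      rw [show AP rowPC (r1 :: r2 :: t') = rowPC r1 r2 + AP rowPC (r2 :: t') from rfl]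
      rfl

theorem foldl_if {γ : Type} (p : γ → Prop) [DecidablePred p] :
    ∀ (L : List γ) (a : Int),
    L.foldl (fun res x => if p x then res + 1 else res) a
      = a + (L.map (fun x => if p x then (1 : Int) else 0)).sum := by
  intro L
  induction L with
  | nil => intro a; simp
  | cons x t ih =>
    intro a
    by_cases hx : p x
    · simp [hx, ih]; ring
    · simp [hx, ih]

theorem sum_range_map {β : Type} (f : β → Int) (d : β) :
    ∀ (n : Nat) (l : List β), n ≤ l.length →
    ((List.range n).map (fun k => f (l.getD k d))).sum = ((l.take n).map f).sum := by
  intro n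
  induction n with
  | zero => intro l _; simp
  | succ n ih =>
    intro l hn
    match l, hn with
    | x :: t, hn =>
      rw [List.range_succ_eq_map]
      simp only [List.map_cons, List.map_map, List.sum_cons, List.take_succ_cons]
      rw [show ((List.range n).map ((fun k => f ((x :: t).getD k d)) ∘ Nat.succ))
            = (List.range n).map (fun k => f (t.getD k d)) from by congr 1]
      rw [ih t (by simpa using hn)]
      rfl

theorem pyGet?_nil {α : Type} (j : Int) : PySem.List.pyGet? ([] : List α) j = none := by
  simp [PySem.List.pyGet?, PySem.List.pyIdx?]

theorem pyCell_eq (s_list : List String) (i j : Int) :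
    pyCell s_list i j = PySem.List.pyGet? ((PySem.List.pyGetD s_list i "").toList) j := by
  cases h : PySem.List.pyGet? s_list i
  · simp only [pyCell, PySem.List.pyGetD, h, Option.getD, Option.bind]
    simp [pyGet?_nil]
  · simp only [pyCell, PySem.List.pyGetD, h, Option.getD, Option.bind]

theorem pyGet?_int_succ {α : Type} (l : List α) (j : Nat) :
    PySem.List.pyGet? l ((j : Int) + 1) = l[j + 1]? := by
  rw [show ((j : Int) + 1) = ((j + 1 : Nat) : Int) from by push_cast; ring,
    PySem.List.pyGet?_natCast]

theorem pyGetD_int_succ (xs : List String) (k : Nat) :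
    PySem.List.pyGetD xs ((k : Int) + 1) "" = xs.getD (k + 1) "" := by
  rw [show ((k : Int) + 1) = ((k + 1 : Nat) : Int) from by push_cast; ring]
  exact PySem.List.pyGetD_natCast xs (k + 1) ""

-- the pairwise-dot indicator as a function of the two optional cells
def Fdot : Option Char → Option Char → Int :=
  fun a b => if a = some '.' ∧ b = some '.' then 1 else 0

theorem Fdot_some : (fun x y => Fdot (some x) (some y)) = ind := by
  funext x y; simp [Fdot, ind]

-- the vertical adjacent-rows functional
def Frow : Option (List Char) → Option (List Char) → Int :=
  fun a b => rowPC (a.getD []) (b.getD [])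

theorem Frow_some : (fun x y => Frow (some x) (some y)) = rowPC := by
  funext x y; rfl

theorem runScore_short (l : List Char) (h : l.length ≤ 1) : runScore l = 0 := by
  rw [runScore_eq]; exact AP_short ind l h

theorem solve_zero_wle (h_ w : Int) (s_list : List String) (hw : w ≤ 0) :
    solve h_ w s_list = 0 := by
  simp only [solve, PySem.List.pyRange_one]
  simp [show w.toNat = 0 from by omega]

theorem solve_zero_hle (h_ w : Int) (s_list : List String) (hh : h_ ≤ 0) :
    solve h_ w s_list = 0 := by
  simp only [solve, PySem.List.pyRange_one]
  simp [show h_.toNat = 0 from by omega]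

theorem solve_zero_11 (s_list : List String) : solve 1 1 s_list = 0 := by
  simp only [solve, PySem.List.pyRange_one]
  simp [show ((0 : Int)).toNat = 0 from rfl]

theorem alt_zero_11 (s_list : List String) : solve_alt 1 1 s_list = 0 := by
  have key : ∀ rows : List (List Char), (∀ r ∈ rows, r.length ≤ 1) → rows.length ≤ 1 →
      (pyZipStar rows).foldl (fun t col => t + runScore col)
        (rows.foldl (fun t line => t + runScore line) 0) = 0 := by
    intro rows h1 h2
    match rows, h2 with
    | [], _ => rfl
    | [r], _ =>
      rw [show pyZipStar [r] = r.map (fun c => [c]) from rfl,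
        PySem.List.foldl_add, PySem.List.foldl_add]
      have hmap : (r.map (fun c => [c])).map runScore = r.map (fun _ => (0 : Int)) := by
        rw [List.map_map]
        exact List.map_congr_left (fun c _ => runScore_short [c] (by simp))
      simp [hmap, runScore_short r (h1 r (by simp))]
  simp only [solve_alt]
  rw [if_neg (by omega)]
  rw [PySem.List.slice_to s_list (by norm_num)]
  rw [show (fun s : String => PySem.List.slice s.toList none (some 1))
        = fun s : String => s.toList.take 1 from by
      funext sStr; rw [PySem.List.slice_to sStr.toList (by norm_num)]; norm_num]
  apply key
  · intro r hr
    obtain ⟨a, -, ha⟩ := List.mem_map.mp hr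
    rw [← ha]
    simp
  · rw [List.length_map]
    simp

-- ===== VERDICT (by name: the statement is the Claim_ definition above) =====
theorem solve_spec : Claim_equal_solve := by
  intro h_ w s_list _ hpre
  unfold Spec_solve
  by_cases hh : h_ ≤ 0
  · rw [solve_zero_hle h_ w s_list hh, solve_alt, if_pos (Or.inl hh)]
  by_cases hw : w ≤ 0
  · rw [solve_zero_wle h_ w s_list hw, solve_alt, if_pos (Or.inr hw)]
  have h0 : 0 ≤ h_ := by omega
  have w0 : 0 ≤ w := by omega
  rcases hpre with hh' | hw' | ⟨hh1, hw1⟩ | ⟨hlen, hrows⟩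
  · omega
  · omega
  · subst hh1; subst hw1
    rw [solve_zero_11, alt_zero_11]
  ·
    set H := h_.toNat with hH
    set W := w.toNat with hW
    set ts : List String := s_list.take H with hts
    set g : List (List Char) := ts.map (fun s => s.toList.take W) with hg
    have hlenTs : ts.length = H := by
      rw [hts, List.length_take]; omega
    have hlenG : g.length = H := by rw [hg, List.length_map, hlenTs]
    have hrect : ∀ r ∈ g, r.length = W := by
      intro r hr
      rw [hg] at hr
      obtain ⟨sStr, hsMem, rfl⟩ := List.mem_map.mp hr
      have := hrows sStr hsMem
      rw [List.length_take]
      omega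
    -- B side
    have hB : solve_alt h_ w s_list = (g.map (AP ind)).sum + AP rowPC g := by
      rw [solve_alt, if_neg (by omega)]
      show (let rows : List (List Char) :=
          (PySem.List.slice s_list none (some h_)).map (fun s => PySem.List.slice s.toList none (some w));
        let total : Int := rows.foldl (fun t line => t + runScore line) 0;
        (pyZipStar rows).foldl (fun t col => t + runScore col) total) = _
      have hrowsEq : (PySem.List.slice s_list none (some h_)).map
          (fun s => PySem.List.slice s.toList none (some w)) = g := by
        rw [PySem.List.slice_to s_list h0, hg, hts]
        apply List.map_congr_left
        intro sStr _
        rw [PySem.List.slice_to sStr.toList w0]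
      rw [hrowsEq, PySem.List.foldl_add, PySem.List.foldl_add]
      simp only [show runScore = AP ind from funext runScore_eq]
      rw [trans_sum W g hrect]
      ring
    rw [hB]
    -- A side: normalize both double loops to range sums
    show (let res1 : Int := (PySem.List.pyRange 0 h_ 1).foldl (fun res i =>
        (PySem.List.pyRange 0 (w - 1) 1).foldl (fun res j =>
          if pyCell s_list i j = some '.' ∧ pyCell s_list i (j + 1) = some '.' then res + 1 else res) res) 0;
      (PySem.List.pyRange 0 (h_ - 1) 1).foldl (fun res i =>
        (PySem.List.pyRange 0 w 1).foldl (fun res j =>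
          if pyCell s_list i j = some '.' ∧ pyCell s_list (i + 1) j = some '.' then res + 1 else res) res) res1) = _
    simp only [pyCell_eq, PySem.List.pyRange_one, List.foldl_map, zero_add, Int.sub_zero]
    simp only [foldl_if, PySem.List.foldl_add, zero_add]
    have hmemT : ∀ k : Nat, k < H → s_list.getD k "" ∈ ts := by
      intro k hk
      have hk' : k < s_list.length := by omega
      rw [List.getD_eq_getElem s_list "" hk', hts]
      have : s_list[k] = (s_list.take H)[k]'(by rw [List.length_take]; omega) := by
        rw [List.getElem_take]
      rw [this]
      exact List.getElem_mem _
    have hG : ∀ m : Nat, m < H → g[m]? = some ((s_list.getD m "").toList.take W) := by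
      intro m hm
      have hm' : m < s_list.length := by omega
      rw [hg, List.getElem?_map, hts]
      rw [show (s_list.take H)[m]? = s_list[m]? from by
        rw [List.getElem?_take]; simp [hm]]
      rw [List.getElem?_eq_getElem hm', List.getD_eq_getElem s_list "" hm']
      rfl
    -- per-row characterization, horizontal
    have hrowH : ∀ k ∈ List.range H,
        ((List.range (w - 1).toNat).map (fun (j : Nat) =>
          if PySem.List.pyGet? ((PySem.List.pyGetD s_list (k : Int) "").toList) ((j : Int)) = some '.' ∧
             PySem.List.pyGet? ((PySem.List.pyGetD s_list (k : Int) "").toList) ((j : Int) + 1) = some '.'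
          then (1 : Int) else 0)).sum
          = AP ind ((s_list.getD k "").toList.take W) := by
      intro k hk
      have hk : k < H := List.mem_range.mp hk
      have hmem : s_list.getD k "" ∈ ts := hmemT k hk
      have hwlen : W ≤ (s_list.getD k "").toList.length := by
        have := hrows _ hmem; omega
      rw [PySem.List.pyGetD_natCast]
      by_cases hw0 : W = 0
      · have h1 : (w - 1).toNat = 0 := by omega
        rw [h1, hw0]
        simp [AP]
      · have hwm : (w - 1).toNat = W - 1 := by omega
        have hadj := adj_sum Fdot (W - 1) (s_list.getD k "").toList (by omega)
        rw [Fdot_some, show W - 1 + 1 = W from by omega] at hadj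
        simp only [Fdot] at hadj
        rw [hwm]
        simp only [PySem.List.pyGet?_natCast, pyGet?_int_succ]
        exact hadj
    -- per-pair characterization, vertical
    have hrowV : ∀ k ∈ List.range (H - 1),
        ((List.range w.toNat).map (fun (j : Nat) =>
          if PySem.List.pyGet? ((PySem.List.pyGetD s_list ((k : Int)) "").toList) ((j : Int)) = some '.' ∧
             PySem.List.pyGet? ((PySem.List.pyGetD s_list ((k : Int) + 1) "").toList) ((j : Int)) = some '.'
          then (1 : Int) else 0)).sum
          = Frow g[k]? g[(k + 1)]? := by
      intro k hk
      have hk : k < H - 1 := List.mem_range.mp hk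
      have hw1 : W ≤ (s_list.getD k "").toList.length := by
        have := hrows _ (hmemT k (by omega)); omega
      have hw2 : W ≤ (s_list.getD (k + 1) "").toList.length := by
        have := hrows _ (hmemT (k + 1) (by omega)); omega
      have hzip := zip_sum Fdot W (s_list.getD k "").toList (s_list.getD (k + 1) "").toList hw1 hw2
      simp only [Fdot] at hzip
      rw [show (fun p : Char × Char => if some p.1 = some '.' ∧ some p.2 = some '.' then (1 : Int) else 0)
            = fun p => ind p.1 p.2 from by funext q; simp [ind]] at hzip
      rw [PySem.List.pyGetD_natCast, pyGetD_int_succ]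
      simp only [PySem.List.pyGet?_natCast]
      rw [show w.toNat = W from rfl, hzip]
      rw [hG k (by omega), hG (k + 1) (by omega)]
      rfl
    -- glue
    rw [show h_.toNat = H from rfl, show (h_ - 1).toNat = H - 1 from by omega]
    congr 1
    · rw [List.map_congr_left hrowH,
        sum_range_map (fun s => AP ind (s.toList.take W)) "" H s_list (by omega)]
      rw [hg, hts, List.map_map]
      rfl
    · by_cases hH0 : H = 0
      · rw [hH0]
        rw [show g = [] from List.eq_nil_of_length_eq_zero (by rw [hlenG, hH0])]
        simp [AP]
      · rw [List.map_congr_left hrowV,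
          adj_sum Frow (H - 1) g (by rw [hlenG]; omega)]
        rw [Frow_some, show H - 1 + 1 = H from by omega,
          show g.take H = g from by rw [← hlenG]; exact List.take_length ..]
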